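-- pv_equiv track=rewrite | github.com/russford/advent | day11.py | next_pwd
-- ===== SOURCE A (Python) =====
-- def next_pwd (s):
--     i = len(s)-1
--     carry = 1
--     while carry and i > 0:
--         if s[i] == "z":
--             s = s[:i]+'a'+s[i+1:]
--             i -= 1
--         else:
--             s = s[:i]+chr(ord(s[i])+1)+s[i+1:]
--             carry = 0
--     return s
-- ===== SOURCE B (Python) =====
-- def next_pwd(s):
--     if len(s) <= 1:
--         return s
--     rest = s[1:]
--     head = rest.rstrip('z')
--     nz = len(rest) - len(head)
--     if not head:
--         return s[0] + 'a' * nz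
--     return s[0] + head[:-1] + chr(ord(head[-1]) + 1) + 'a' * nz
-- ===== Notes on version B (the rewrite author's own statement) =====
-- stated objective: simpler
-- what changed: Replaces the per-character carry loop that rebuilds the string by slicing at every step with a single-shot computation: right-strip the trailing run of the wrap character from s[1:], bump the character just before it, and pad with that many wrapped-around characters; s[0] stays untouched and len(s)<=1 returns s unchanged, exactly as in A.
import Mathlib
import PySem

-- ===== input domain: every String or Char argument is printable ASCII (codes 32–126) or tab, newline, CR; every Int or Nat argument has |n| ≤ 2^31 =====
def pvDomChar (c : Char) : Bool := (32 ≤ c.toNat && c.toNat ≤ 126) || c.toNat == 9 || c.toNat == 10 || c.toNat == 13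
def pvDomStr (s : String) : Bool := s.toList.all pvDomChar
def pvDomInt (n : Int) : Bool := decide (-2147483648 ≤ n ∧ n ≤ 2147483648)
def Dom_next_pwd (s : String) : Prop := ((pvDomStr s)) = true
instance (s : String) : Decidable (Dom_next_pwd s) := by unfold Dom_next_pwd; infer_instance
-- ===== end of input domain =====

-- B replaces A's per-character carry loop (which rebuilds the string by slicing at each step)
-- by one direct computation on s[1:]: right-strip the trailing wrap-character run, bump the char before it, pad.


-- ===== PORT A =====
-- the while loop: `while carry and i > 0: …`; in the non-'z' branch carry becomes 0,
-- so the loop exits right after that branch — transliterated as returning there.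
def pvLoopA (s : List Char) (i : Int) : List Char :=
  if 0 < i then
    match PySem.List.pyGet? s i with
    | none => s    -- unreachable: i starts at len(s)-1 and only decreases while > 0, the length never changes
    | some c =>
      if c = 'z' then
        pvLoopA (PySem.List.slice s none (some i) ++ ['a'] ++ PySem.List.slice s (some (i + 1)) none) (i - 1)
      else
        PySem.List.slice s none (some i) ++ [Char.ofNat (c.toNat + 1)] ++ PySem.List.slice s (some (i + 1)) none
  else s
termination_by i.toNat
decreasing_by omega

def next_pwd (s : String) : String :=
  String.ofList (pvLoopA s.toList ((s.toList.length : Int) - 1))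

-- ===== PORT B =====
-- rest.rstrip('z') ported by hand (PySem has no one-char rstrip): reverse, drop the leading
-- run of 'z', reverse back — exactly Python's right-strip of the single character 'z'.
def next_pwd_alt (s : String) : String :=
  let l := s.toList
  if l.length ≤ 1 then s
  else
    let rest := PySem.List.slice l (some 1) none                 -- s[1:]
    let head := (rest.reverse.dropWhile (· = 'z')).reverse       -- rest.rstrip('z')
    let nz := rest.length - head.length
    if head = [] then
      String.ofList (l.headI :: List.replicate nz 'a')
    else
      -- head[:-1] + chr(ord(head[-1])+1) + 'a'*nz  (head ≠ [] in this branch, so getLastD's default is never used)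
      String.ofList (l.headI :: (head.dropLast ++ [Char.ofNat ((head.getLastD 'a').toNat + 1)] ++ List.replicate nz 'a'))

-- ===== PRECONDITION & SPEC =====
def Spec_next_pwd (s : String) (out : String) : Prop := out = next_pwd_alt s
instance (s : String) (out : String) : Decidable (Spec_next_pwd s out) := by unfold Spec_next_pwd; infer_instance

-- ===== CLAIM (what is proved, stated in full; the proofs are below) =====
def Claim_equal_next_pwd : Prop := ∀ (s : String), Dom_next_pwd s → Spec_next_pwd s (next_pwd s)

-- ===== LEMMAS AND PROOFS =====

-- A's loop read backwards: pvG rl t processes the reversed prefix rl (chars at positions i, i-1, …, 0)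
-- with t the already-finished suffix; the last element of rl is s[0] and is never incremented.
def pvG : List Char → List Char → List Char
  | [], t => t
  | [c], t => c :: t
  | c :: c' :: rp, t =>
      if c = 'z' then pvG (c' :: rp) ('a' :: t)
      else (c' :: rp).reverse ++ Char.ofNat (c.toNat + 1) :: t

-- B's result (list form) as a function of the reversed tail rl = rest.reverse and the head char h.
def pvB (rl : List Char) (h : Char) : List Char :=
  match rl.dropWhile (· = 'z') with
  | [] => h :: List.replicate rl.length 'a'
  | c :: rs => h :: rs.reverse ++ Char.ofNat (c.toNat + 1) :: List.replicate (rl.length - rs.length - 1) 'a'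

lemma pvLoopA_eq_pvG (p : List Char) (c : Char) (t : List Char) :
    pvLoopA (p ++ c :: t) (p.length : Int) = pvG (c :: p.reverse) t := by
  induction p using List.reverseRecOn generalizing c t with
  | nil => simp [pvLoopA, pvG]
  | append_singleton p' c' ih =>
    rw [pvLoopA]
    have hpos : (0 : Int) < ((p' ++ [c']).length : Int) := by simp
    rw [if_pos hpos]
    have hget : PySem.List.pyGet? ((p' ++ [c']) ++ c :: t) ((p' ++ [c']).length : Int)
        = some c := by
      rw [PySem.List.pyGet?_natCast]; simp
    rw [hget]
    have hsl1 : PySem.List.slice ((p' ++ [c']) ++ c :: t) none (some ((p' ++ [c']).length : Int))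
        = p' ++ [c'] := by
      rw [PySem.List.slice_to_natCast]; exact List.take_left
    have hsl2 : PySem.List.slice ((p' ++ [c']) ++ c :: t) (some (((p' ++ [c']).length : Int) + 1)) none
        = t := by
      have hc : (((p' ++ [c']).length : Int) + 1) = (((p' ++ [c']).length + 1 : Nat) : Int) := by
        push_cast; ring
      rw [hc, PySem.List.slice_from_natCast]
      rw [show (p' ++ [c']) ++ c :: t = (p' ++ [c', c]) ++ t by simp]
      exact List.drop_left' (by simp)
    dsimp only
    by_cases hz : c = 'z'
    · subst hz
      rw [if_pos rfl, hsl1, hsl2]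
      have harg : (p' ++ [c']) ++ ['a'] ++ t = p' ++ c' :: 'a' :: t := by simp
      have hidx : ((p' ++ [c']).length : Int) - 1 = (p'.length : Int) := by simp
      rw [harg, hidx, ih c' ('a' :: t)]
      simp [pvG]
    · rw [if_neg hz, hsl1, hsl2]
      simp [pvG, hz]

lemma pvG_eq_pvB (rl : List Char) (h : Char) (t : List Char) :
    pvG (rl ++ [h]) t = pvB rl h ++ t := by
  induction rl generalizing t with
  | nil => simp [pvG, pvB]
  | cons c rl' ih =>
    by_cases hz : c = 'z'
    · subst hz
      have hstep : pvG (('z' :: rl') ++ [h]) t = pvG (rl' ++ [h]) ('a' :: t) := by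
        cases rl' <;> simp [pvG]
      rw [hstep, ih ('a' :: t)]
      have hB : pvB ('z' :: rl') h = pvB rl' h ++ ['a'] := by
        unfold pvB
        rw [List.dropWhile_cons_of_pos (by simp)]
        cases hdw : rl'.dropWhile (· = 'z') with
        | nil => simp [List.replicate_succ']
        | cons c'' rs =>
          have hle : rs.length < rl'.length := by
            have := List.length_dropWhile_le (p := (· = 'z')) (l := rl')
            rw [hdw] at this; simp at this; omega
          have hcount : rl'.length + 1 - rs.length - 1 = (rl'.length - rs.length - 1) + 1 := by
            omega
          simp [hcount, List.replicate_succ']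
      rw [hB]; simp
    · have hstep : pvG ((c :: rl') ++ [h]) t
          = (rl' ++ [h]).reverse ++ Char.ofNat (c.toNat + 1) :: t := by
        cases rl' <;> simp [pvG, hz]
      rw [hstep]
      unfold pvB
      rw [List.dropWhile_cons_of_neg (by simp [hz])]
      simp

-- B's branches, for a string of length ≥ 2, compute exactly pvB on the reversed tail.
lemma alt_eq_pvB (s : String) (c0 : Char) (rest : List Char)
    (hl : s.toList = c0 :: rest) (hr : rest ≠ []) :
    next_pwd_alt s = String.ofList (pvB rest.reverse c0) := by
  unfold next_pwd_alt
  rw [hl]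
  have hlen : ¬ (c0 :: rest).length ≤ 1 := by
    cases rest with
    | nil => exact absurd rfl hr
    | cons a l => simp
  rw [if_neg hlen]
  simp only [PySem.List.slice_from_one, List.tail_cons, List.headI]
  cases hdw : rest.reverse.dropWhile (· = 'z') with
  | nil =>
    simp [pvB, hdw]
  | cons c rs =>
    have hlen' : rs.length < rest.length := by
      have := List.length_dropWhile_le (p := (· = 'z')) (l := rest.reverse)
      rw [hdw] at this; simp at this; omega
    simp only [List.reverse_cons]
    rw [if_neg (by simp)]
    rw [List.dropLast_concat, List.getLastD_concat]
    simp [pvB, hdw]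
    rw [← Nat.sub_sub]

lemma next_pwd_eq_alt (s : String) : next_pwd s = next_pwd_alt s := by
  by_cases hlen : s.toList.length ≤ 1
  · unfold next_pwd next_pwd_alt
    rw [if_pos hlen, pvLoopA]
    have hni : ¬ (0 : Int) < (s.toList.length : Int) - 1 := by omega
    rw [if_neg hni]
    exact String.ofList_toList
  · obtain ⟨c0, rest, hl⟩ : ∃ c0 rest, s.toList = c0 :: rest := by
      cases h : s.toList with
      | nil => rw [h] at hlen; simp at hlen
      | cons a l => exact ⟨a, l, rfl⟩
    have hrest : rest ≠ [] := by
      intro h; rw [hl, h] at hlen; simp at hlen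
    have hne : s.toList ≠ [] := by rw [hl]; simp
    have hidx : ((s.toList.length : Int) - 1) = (s.toList.dropLast.length : Int) := by
      rw [List.length_dropLast]
      have : s.toList.length ≠ 0 := by rw [hl]; simp
      omega
    have hloop : pvLoopA s.toList ((s.toList.length : Int) - 1) = pvB rest.reverse c0 := by
      rw [hidx]
      calc pvLoopA s.toList (s.toList.dropLast.length : Int)
          = pvLoopA (s.toList.dropLast ++ s.toList.getLast hne :: [])
              (s.toList.dropLast.length : Int) := by
              rw [List.dropLast_append_getLast hne]
        _ = pvG (s.toList.getLast hne :: s.toList.dropLast.reverse) [] :=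
              pvLoopA_eq_pvG _ _ _
        _ = pvG s.toList.reverse [] := by
              conv_rhs => rw [← List.dropLast_append_getLast hne]
              simp
        _ = pvG (rest.reverse ++ [c0]) [] := by rw [hl]; simp
        _ = pvB rest.reverse c0 ++ [] := pvG_eq_pvB _ _ _
        _ = pvB rest.reverse c0 := List.append_nil _
    unfold next_pwd
    rw [hloop, alt_eq_pvB s c0 rest hl hrest]

-- ===== VERDICT (by name: the statement is the Claim_ definition above) =====
theorem next_pwd_spec : Claim_equal_next_pwd := by
  intro s _
  unfold Spec_next_pwd
  exact next_pwd_eq_alt s
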